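-- pv_equiv track=rewrite | github.com/chavnho/painel-licencas | app.py | decodificar_data
-- ===== SOURCE A (Python) =====
-- def decodificar_data(data_codificada):
--     # desfaz o embaralhamento: metade inicial = ímpares, metade final = pares
--     tamanho = len(data_codificada)
--     metade = tamanho // 2
--     grupoA = data_codificada[:metade]
--     grupoB = data_codificada[metade:]
--     resultado = []
--     for i in range(metade):
--         resultado.append(grupoA[i])
--         if i < len(grupoB):
--             resultado.append(grupoB[i])
--     return ''.join(resultado)
-- ===== SOURCE B (Python) =====
-- def decodificar_data(data_codificada):
--     # pre-sized buffer filled by two bulk strided slice assignments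
--     m = len(data_codificada) // 2
--     res = [''] * (2 * m)
--     res[0::2] = data_codificada[:m]
--     res[1::2] = data_codificada[m:2 * m]
--     return ''.join(res)
-- ===== Notes on version B (the rewrite author's own statement) =====
-- stated objective: alternative
-- what changed: Replaces A's element-by-element interleaving loop with a pre-sized buffer of length 2*(len//2) filled by two bulk strided slice assignments (res[0::2], res[1::2]) and a single join.
import Mathlib
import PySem

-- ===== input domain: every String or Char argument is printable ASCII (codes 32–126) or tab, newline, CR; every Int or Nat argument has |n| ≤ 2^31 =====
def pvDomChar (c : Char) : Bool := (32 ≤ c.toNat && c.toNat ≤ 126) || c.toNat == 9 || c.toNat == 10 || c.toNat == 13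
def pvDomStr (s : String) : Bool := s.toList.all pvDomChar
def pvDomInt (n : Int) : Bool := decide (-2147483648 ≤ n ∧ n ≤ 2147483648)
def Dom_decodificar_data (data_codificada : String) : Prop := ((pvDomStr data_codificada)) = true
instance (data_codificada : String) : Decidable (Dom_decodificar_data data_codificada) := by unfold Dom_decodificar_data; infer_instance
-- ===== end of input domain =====

-- B replaces A's per-element interleaving loop with a pre-sized buffer filled by two
-- strided slice assignments; same O(n) cost, different construction (objective: alternative).

-- ===== PORT A =====
-- indices are provably in range, so pyGetD transcribes grupoA[i]/grupoB[i]
def decodificar_data (data_codificada : String) : String :=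
  let tamanho : Int := PySem.Str.len data_codificada
  let metade : Int := PySem.Int.floordiv tamanho 2
  let grupoA := PySem.Str.slice data_codificada none (some metade)
  let grupoB := PySem.Str.slice data_codificada (some metade) none
  let resultado : List Char := (PySem.List.pyRange 0 metade 1).foldl
    (fun resultado i =>
      let resultado := resultado ++ [PySem.List.pyGetD grupoA.toList i '?']
      if i < PySem.Str.len grupoB then resultado ++ [PySem.List.pyGetD grupoB.toList i '?']
      else resultado)
    []
  String.ofList resultado  -- ''.join of single chars

-- ===== PORT B =====
-- strided slice assignment res[start::2] = xs: writes the elements two apart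
def pvStride2 (res : List String) (xs : List Char) : List String :=
  match res, xs with
  | res, [] => res
  | [], _ => []
  | [_], c :: _ => [String.ofList [c]]
  | _ :: r1 :: rest, c :: cs => String.ofList [c] :: r1 :: pvStride2 rest cs

def decodificar_data_alt (data_codificada : String) : String :=
  let m : Int := PySem.Int.floordiv (PySem.Str.len data_codificada) 2
  let res : List String := List.replicate (2 * m).toNat ""
  let res := pvStride2 res (PySem.Str.slice data_codificada none (some m)).toList       -- res[0::2] = s[:m]
  let res := match res with                                                             -- res[1::2] = s[m:2*m]
    | [] => ([] : List String)
    | r0 :: rest => r0 :: pvStride2 rest (PySem.Str.slice data_codificada (some m) (some (2*m))).toList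
  PySem.Str.join "" res

-- ===== PRECONDITION & SPEC =====
def Spec_decodificar_data (data_codificada : String) (out : String) : Prop := out = decodificar_data_alt data_codificada
instance (data_codificada : String) (out : String) : Decidable (Spec_decodificar_data data_codificada out) := by unfold Spec_decodificar_data; infer_instance

-- ===== CLAIM (what is proved, stated in full; the proofs are below) =====
def Claim_equal_decodificar_data : Prop := ∀ (data_codificada : String), Dom_decodificar_data data_codificada → Spec_decodificar_data data_codificada (decodificar_data data_codificada)

-- ===== LEMMAS AND PROOFS =====

def pvInterleave : List Char → List Char → List Char
  | a :: as, b :: bs => a :: b :: pvInterleave as bs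
  | _, _ => []

theorem pvInterleave_snoc (l1 l2 : List Char) (h : l1.length = l2.length) (a b : Char) :
    pvInterleave (l1 ++ [a]) (l2 ++ [b]) = pvInterleave l1 l2 ++ [a, b] := by
  induction l1 generalizing l2 with
  | nil => cases l2 with
    | nil => simp [pvInterleave]
    | cons x xs => simp at h
  | cons x xs ih => cases l2 with
    | nil => simp at h
    | cons y ys => simp [pvInterleave]; exact ih ys (by simpa using h)

theorem pvLoopA (t1 t2 : List Char) (n : Nat) (h1 : n ≤ t1.length) (h2 : n ≤ t2.length)
    (acc : List Char) :
    (List.range n).foldl (fun (res : List Char) (k : Nat) =>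
        let res := res ++ [PySem.List.pyGetD t1 (0 + (k : Int)) '?']
        if (0 + (k : Int)) < (t2.length : Int) then res ++ [PySem.List.pyGetD t2 (0 + (k : Int)) '?']
        else res) acc
      = acc ++ pvInterleave (t1.take n) (t2.take n) := by
  induction n generalizing acc with
  | zero => simp [pvInterleave]
  | succ n ih =>
    rw [List.range_succ, List.foldl_append]
    rw [ih (by omega) (by omega)]
    simp only [List.foldl_cons, List.foldl_nil]
    rw [if_pos (by omega)]
    have g1 : PySem.List.pyGetD t1 (0 + (n : Int)) '?' = t1.getD n '?' := by
      rw [show (0 + (n : Int)) = (n : Int) by omega, PySem.List.pyGetD_natCast]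
    have g2 : PySem.List.pyGetD t2 (0 + (n : Int)) '?' = t2.getD n '?' := by
      rw [show (0 + (n : Int)) = (n : Int) by omega, PySem.List.pyGetD_natCast]
    have t1s : t1.take (n + 1) = t1.take n ++ [t1.getD n '?'] := by
      rw [List.take_add_one]
      congr 1
      rw [List.getElem?_eq_getElem (by omega)]
      simp [List.getD, List.getElem?_eq_getElem (show n < t1.length by omega)]
    have t2s : t2.take (n + 1) = t2.take n ++ [t2.getD n '?'] := by
      rw [List.take_add_one]
      congr 1
      rw [List.getElem?_eq_getElem (by omega)]
      simp [List.getD, List.getElem?_eq_getElem (show n < t2.length by omega)]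
    rw [g1, g2, t1s, t2s,
      pvInterleave_snoc _ _ (by simp; omega), List.append_assoc]
    simp

theorem pvStrideB (l1 l2 : List Char) (h : l1.length = l2.length) :
    (match pvStride2 (List.replicate (2 * l1.length) "") l1 with
      | [] => ([] : List String)
      | r0 :: rest => r0 :: pvStride2 rest l2)
    = (pvInterleave l1 l2).map (fun c => String.ofList [c]) := by
  induction l1 generalizing l2 with
  | nil =>
    cases l2 with
    | nil => simp [pvStride2, pvInterleave]
    | cons y ys => simp at h
  | cons a as ih =>
    cases l2 with
    | nil => simp at h
    | cons b bs =>
      have hlen : as.length = bs.length := by simpa using h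
      rw [show List.replicate (2 * (a :: as).length) ("" : String)
            = "" :: "" :: List.replicate (2 * as.length) "" by
        rw [show 2 * (a :: as).length = 2 * as.length + 1 + 1 by simp; omega]
        simp [List.replicate_succ]]
      cases as with
      | nil =>
        cases bs with
        | nil => simp [pvStride2, pvInterleave]
        | cons => simp at hlen
      | cons a' as' =>
        cases bs with
        | nil => simp at hlen
        | cons b' bs' =>
          -- unfold the first strided write one step
          have : pvStride2 ("" :: "" :: List.replicate (2 * (a' :: as').length) "") (a :: a' :: as')
              = String.ofList [a] :: "" :: pvStride2 (List.replicate (2 * (a' :: as').length) "") (a' :: as') := by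
            simp [pvStride2]
          rw [this]
          have hne : pvStride2 (List.replicate (2 * (a' :: as').length) "") (a' :: as') ≠ [] := by
            simp only [List.length_cons]
            cases hrep2 : List.replicate (2 * (as'.length + 1)) ("" : String) with
            | nil => exfalso; have := congrArg List.length hrep2; simp at this
            | cons z zs =>
              cases zs with
              | nil => exfalso; have := congrArg List.length hrep2; simp at this
              | cons z' zs' => cases as' <;> simp [pvStride2]
          obtain ⟨r1, rest, hcons⟩ : ∃ r1 rest, pvStride2 (List.replicate (2 * (a' :: as').length) "") (a' :: as') = r1 :: rest := by
            cases hx : pvStride2 (List.replicate (2 * (a' :: as').length) "") (a' :: as') with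
            | nil => exact absurd hx hne
            | cons r1 rest => exact ⟨r1, rest, rfl⟩
          have ihx := ih (b' :: bs') (by simpa using hlen)
          rw [hcons] at ihx ⊢
          simp only [pvStride2, pvInterleave, List.map_cons]
          simpa [pvInterleave, pvStride2] using ihx

theorem pvJoin_singletons (cs : List Char) :
    PySem.Str.join "" (cs.map (fun c => String.ofList [c])) = String.ofList cs := by
  have h : (PySem.Str.join "" (cs.map (fun c => String.ofList [c]))).toList = cs := by
    rw [PySem.Str.toList_join]
    have : (cs.map (fun c => String.ofList [c])).map String.toList = cs.map (fun c => [c]) := by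
      simp [Function.comp]
    simp only [this]
    simpa using PySem.Chars.join_nil_singletons cs
  have h2 := congrArg String.ofList h
  rwa [String.ofList_toList] at h2

-- ===== VERDICT (by name: the statement is the Claim_ definition above) =====
theorem decodificar_data_spec : Claim_equal_decodificar_data := by
  intro s _
  unfold Spec_decodificar_data decodificar_data decodificar_data_alt
  set m : Nat := s.toList.length / 2 with hmdef
  have hsl : s.toList.length = s.length := by simp
  have hmle : m ≤ s.toList.length := by omega
  have hm : PySem.Int.floordiv (PySem.Str.len s) 2 = ((m : Nat) : Int) := by
    simp only [PySem.Str.len_eq, PySem.Int.floordiv]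
    rw [Int.fdiv_eq_ediv]
    simp
    omega
  have hA : (PySem.Str.slice s none (some ((m : Nat) : Int))).toList = s.toList.take m := by
    rw [PySem.Str.toList_slice]
    simp [PySem.Chars.slice_eq_listSlice, PySem.List.slice_to_natCast]
  have hB : (PySem.Str.slice s (some ((m : Nat) : Int)) none).toList = s.toList.drop m := by
    rw [PySem.Str.toList_slice]
    simp [PySem.Chars.slice_eq_listSlice, PySem.List.slice_from_natCast]
  have hB2 : (PySem.Str.slice s (some ((m : Nat) : Int)) (some (2 * ((m : Nat) : Int)))).toList
      = (s.toList.drop m).take m := by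
    rw [PySem.Str.toList_slice]
    have h2 : (2 * ((m : Nat) : Int)) = ((m : Nat) : Int) + ((m : Nat) : Int) := by ring
    simp [PySem.Chars.slice_eq_listSlice, h2, PySem.List.slice_natCast_add]
  have hlenB : PySem.Str.len (PySem.Str.slice s (some ((m : Nat) : Int)) none)
      = ((s.toList.drop m).length : Int) := by
    have := congrArg List.length hB
    simp only [PySem.Str.len_eq]
    omega
  have h2m : (2 * ((m : Nat) : Int)).toNat = 2 * m := by omega
  simp only [hm, hA, hB, hB2, hlenB, h2m]
  rw [PySem.List.pyRange_one]
  simp only [Int.sub_zero, Int.toNat_natCast, List.foldl_map]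
  rw [pvLoopA (s.toList.take m) (s.toList.drop m) m (by simp; omega) (by simp; omega) []]
  have hl1 : (s.toList.take m).length = m := by simp; omega
  have hl2 : ((s.toList.drop m).take m).length = m := by simp; omega
  have hst := pvStrideB (s.toList.take m) ((s.toList.drop m).take m) (by omega)
  rw [hl1] at hst
  rw [hst, pvJoin_singletons]
  simp [List.take_take]
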